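-- pv_equiv track=rewrite | github.com/miliar/Code_Jam_Webscraper | solutions_python/solutions_year11_round0_nr1/646.py | solve
-- ===== SOURCE A (Python) =====
-- def solve(data):
--     result = 0
--     bot_O = 0
--     bot_B = 0
--     pos_O = 1
--     pos_B = 1
--     prev = None
--
--     for step in data:
--         if step[0] == 'O':
--             clock = abs(pos_O - step[1])
--             if prev == 'B':
--                 clock = clock - bot_B
--                 if clock < 0:
--                     clock = 0
--                 prev = 'O'
--                 bot_O = clock + 1
--             else:
--                 bot_O = bot_O + clock + 1
--                 prev = 'O'
--             pos_O = step[1]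
--             result = result + clock + 1
--         else:
--             clock = abs(pos_B - step[1])
--             if prev == 'O':
--                 clock = clock - bot_O
--                 if clock < 0:
--                     clock = 0
--                 prev = 'B'
--                 bot_B = clock + 1
--             else:
--                 bot_B = bot_B + clock + 1
--                 prev = 'B'
--             pos_B = step[1]
--             result = result + clock + 1
-- #        print result, ' ', pos_O, ' ', pos_B, ' ', bot_O, ' ', bot_B, ' ', prev
-- #    print ''
--     return result
-- ===== SOURCE B (Python) =====
-- def solve(data):
--     t = 0
--     timeO = 0
--     timeB = 0
--     posO = 1
--     posB = 1
--     for step in data: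
--         if step[0] == 'O':
--             move = abs(posO - step[1])
--             t = max(t, timeO + move) + 1
--             timeO = t
--             posO = step[1]
--         else:
--             move = abs(posB - step[1])
--             t = max(t, timeB + move) + 1
--             timeB = t
--             posB = step[1]
--     return t
-- ===== Notes on version B (the rewrite author's own statement) =====
-- stated objective: simpler
-- what changed: Replaces A's prev-robot flag and relative subtract-and-clamp clocks (result accumulated incrementally) with an absolute-time formulation: one global press time t and a ready time per robot, each step doing t = max(t, ready + move) + 1.
import Mathlib
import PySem

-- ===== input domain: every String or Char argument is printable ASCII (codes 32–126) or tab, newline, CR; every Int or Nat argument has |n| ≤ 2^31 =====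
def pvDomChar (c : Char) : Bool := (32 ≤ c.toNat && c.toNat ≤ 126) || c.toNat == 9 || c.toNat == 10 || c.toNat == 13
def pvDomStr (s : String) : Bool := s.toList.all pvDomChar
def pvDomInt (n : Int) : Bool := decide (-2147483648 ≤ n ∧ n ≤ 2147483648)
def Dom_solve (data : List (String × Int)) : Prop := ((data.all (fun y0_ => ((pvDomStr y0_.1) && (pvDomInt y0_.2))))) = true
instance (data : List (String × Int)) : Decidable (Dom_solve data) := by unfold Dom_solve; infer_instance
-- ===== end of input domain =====

-- B replaces A's prev-flag and subtract-and-clamp relative clocks with absolute press times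
-- (objective: simpler decomposition); equal return values.

-- ===== PORT A =====
-- A's loop state: (result, bot_O, bot_B, pos_O, pos_B, prev)
structure StA where
  result : Int
  botO : Int
  botB : Int
  posO : Int
  posB : Int
  prev : Option Char
deriving Repr, DecidableEq

-- step[0] indexes the TUPLE: step[0] == 'O' is string equality of the first component with "O".
def stepA (s : StA) (step : String × Int) : StA :=
  if step.1 = "O" then
    let clock := |s.posO - step.2|
    if s.prev = some 'B' then
      let clock := clock - s.botB
      let clock := if clock < 0 then 0 else clock
      { s with prev := some 'O', botO := clock + 1, posO := step.2,
               result := s.result + clock + 1 }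
    else
      { s with botO := s.botO + clock + 1, prev := some 'O', posO := step.2,
               result := s.result + clock + 1 }
  else
    let clock := |s.posB - step.2|
    if s.prev = some 'O' then
      let clock := clock - s.botO
      let clock := if clock < 0 then 0 else clock
      { s with prev := some 'B', botB := clock + 1, posB := step.2,
               result := s.result + clock + 1 }
    else
      { s with botB := s.botB + clock + 1, prev := some 'B', posB := step.2,
               result := s.result + clock + 1 }

def solve (data : List (String × Int)) : Int :=
  (data.foldl stepA ⟨0, 0, 0, 1, 1, none⟩).result

-- ===== PORT B =====
-- B's loop state: (t, timeO, timeB, posO, posB) — absolute times of last press / robot-ready.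
structure StB where
  t : Int
  timeO : Int
  timeB : Int
  posO : Int
  posB : Int
deriving Repr, DecidableEq

def stepB (s : StB) (step : String × Int) : StB :=
  if step.1 = "O" then
    let move := |s.posO - step.2|
    let t := max s.t (s.timeO + move) + 1
    { t := t, timeO := t, timeB := s.timeB, posO := step.2, posB := s.posB }
  else
    let move := |s.posB - step.2|
    let t := max s.t (s.timeB + move) + 1
    { t := t, timeO := s.timeO, timeB := t, posO := s.posO, posB := step.2 }

def solve_alt (data : List (String × Int)) : Int :=
  (data.foldl stepB ⟨0, 0, 0, 1, 1⟩).t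

-- ===== PRECONDITION & SPEC =====
def Spec_solve (data : List (String × Int)) (out : Int) : Prop := out = solve_alt data
instance (data : List (String × Int)) (out : Int) : Decidable (Spec_solve data out) := by unfold Spec_solve; infer_instance

-- ===== CLAIM (what is proved, stated in full; the proofs are below) =====
def Claim_equal_solve : Prop := ∀ (data : List (String × Int)), Dom_solve data → Spec_solve data (solve data)

-- ===== LEMMAS AND PROOFS =====

-- The invariant: results and positions agree; the last-pressed robot X has timeX = t and
-- A's botX equals t minus the other robot's ready time.
def pvInv (a : StA) (b : StB) : Prop :=
  a.result = b.t ∧ a.posO = b.posO ∧ a.posB = b.posB ∧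
    ((a.prev = none ∧ b.timeO = b.t ∧ b.timeB = b.t ∧ a.botO = 0 ∧ a.botB = 0)
     ∨ (a.prev = some 'O' ∧ b.timeO = b.t ∧ a.botO = b.t - b.timeB)
     ∨ (a.prev = some 'B' ∧ b.timeB = b.t ∧ a.botB = b.t - b.timeO))

theorem Inv_step (a : StA) (b : StB) (s : String × Int) (h : pvInv a b) :
    pvInv (stepA a s) (stepB b s) := by
  obtain ⟨hres, hpO, hpB, hcase⟩ := h
  unfold pvInv stepA stepB
  by_cases hc : s.1 = "O" <;>
    simp only [hc, if_true, if_false]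
  · -- O branch
    have hm : 0 ≤ |a.posO - s.2| := abs_nonneg _
    rw [hpO] at *
    rcases hcase with ⟨h1, h2, h3, h4, h5⟩ | ⟨h1, h2, h3⟩ | ⟨h1, h2, h3⟩ <;>
      simp only [h1, reduceCtorEq, Option.some.injEq, Char.reduceEq, reduceIte] <;>
      refine ⟨?_, by trivial, by exact hpB, Or.inr (Or.inl ⟨by trivial, ?_, ?_⟩)⟩ <;> dsimp only <;> (try split_ifs) <;> omega
  · -- B branch
    have hm : 0 ≤ |a.posB - s.2| := abs_nonneg _
    rw [hpB] at *
    rcases hcase with ⟨h1, h2, h3, h4, h5⟩ | ⟨h1, h2, h3⟩ | ⟨h1, h2, h3⟩ <;>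
      simp only [h1, reduceCtorEq, Option.some.injEq, Char.reduceEq, reduceIte] <;>
      refine ⟨?_, by exact hpO, by trivial, Or.inr (Or.inr ⟨by trivial, ?_, ?_⟩)⟩ <;> dsimp only <;> (try split_ifs) <;> omega

theorem Inv_foldl (data : List (String × Int)) :
    ∀ (a : StA) (b : StB), pvInv a b →
      (data.foldl stepA a).result = (data.foldl stepB b).t := by
  induction data with
  | nil => intro a b h; exact h.1
  | cons s rest ih =>
      intro a b h
      exact ih _ _ (Inv_step a b s h)

-- ===== VERDICT (by name: the statement is the Claim_ definition above) =====
theorem solve_spec : Claim_equal_solve := by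
  intro data _
  unfold Spec_solve solve solve_alt
  exact Inv_foldl data _ _ (by simp [pvInv])
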